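-- pv_equiv track=rewrite | github.com/naveenkarasu/resume-brain | training/data_prep/m4_data.py | _parse_education_level
-- ===== SOURCE A (Python) =====
-- EDU_LEVELS: dict[str, int] = {
--     "high_school": 0,
--     "associate": 1,
--     "bachelor": 2,
--     "bachelors": 2,
--     "master": 3,
--     "masters": 3,
--     "mba": 3,
--     "phd": 4,
--     "doctorate": 4,
-- }
--
-- def _parse_education_level(edu_str: str) -> int:
--     """Parse education string into ordinal level."""
--     if not edu_str:
--         return 0
--     edu_lower = edu_str.lower()
--     for keyword, level in sorted(EDU_LEVELS.items(), key=lambda x: -x[1]):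
--         if keyword in edu_lower:
--             return level
--     return 0
-- ===== SOURCE B (Python) =====
-- EDU_LEVELS: dict[str, int] = {
--     "high_school": 0,
--     "associate": 1,
--     "bachelor": 2,
--     "bachelors": 2,
--     "master": 3,
--     "masters": 3,
--     "mba": 3,
--     "phd": 4,
--     "doctorate": 4,
-- }
--
-- def _parse_education_level(edu_str: str) -> int:
--     """Parse education string into ordinal level."""
--     if not edu_str:
--         return 0
--     edu_lower = edu_str.lower()
--     return max((level for keyword, level in EDU_LEVELS.items() if keyword in edu_lower), default=0)
-- ===== Notes on version B (the rewrite author's own statement) =====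
-- stated objective: simpler
-- what changed: Replaces the sort-by-descending-level plus first-match early-exit loop with a single unordered pass that takes the maximum matching level (max with default 0), eliminating the sort.
import Mathlib
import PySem

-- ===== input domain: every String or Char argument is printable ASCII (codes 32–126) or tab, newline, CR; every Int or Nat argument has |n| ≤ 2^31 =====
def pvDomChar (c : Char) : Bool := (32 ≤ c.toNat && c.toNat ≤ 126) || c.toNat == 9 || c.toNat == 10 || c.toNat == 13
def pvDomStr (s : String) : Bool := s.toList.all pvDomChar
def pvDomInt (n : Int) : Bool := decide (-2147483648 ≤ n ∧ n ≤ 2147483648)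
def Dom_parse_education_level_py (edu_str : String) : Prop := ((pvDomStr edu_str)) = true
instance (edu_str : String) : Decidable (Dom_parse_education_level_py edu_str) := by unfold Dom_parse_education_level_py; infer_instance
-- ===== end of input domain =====

-- B replaces A's sort-by-descending-level + first-match early-exit scan by a single
-- unordered pass taking the maximum matching level (simpler; no sort).

-- ===== PORT A =====
def eduLevels : PySem.Dict String Int := PySem.Dict.ofList
  [("high_school", 0), ("associate", 1), ("bachelor", 2), ("bachelors", 2),
   ("master", 3), ("masters", 3), ("mba", 3), ("phd", 4), ("doctorate", 4)]

-- A's for-loop with early return over the sorted items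
def eduScan (edu_lower : String) : List (String × Int) → Int
  | [] => 0
  | (keyword, level) :: rest =>
    if PySem.Str.isIn keyword edu_lower then level else eduScan edu_lower rest

def parse_education_level_py (edu_str : String) : Int :=
  if edu_str = "" then 0
  else
    let edu_lower := PySem.Str.lower edu_str
    eduScan edu_lower (PySem.List.sorted (PySem.Dict.items eduLevels) (fun x => -x.2) false)

-- ===== PORT B =====
def parse_education_level_py_alt (edu_str : String) : Int :=
  if edu_str = "" then 0
  else
    let edu_lower := PySem.Str.lower edu_str
    -- max(generator, default=0): running maximum over the matching levels
    match (PySem.Dict.items eduLevels).filterMap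
        (fun p => if PySem.Str.isIn p.1 edu_lower then some p.2 else none) with
    | [] => 0
    | h :: t => t.foldl max h

-- ===== PRECONDITION & SPEC =====
def Spec_parse_education_level_py (edu_str : String) (out : Int) : Prop := out = parse_education_level_py_alt edu_str
instance (edu_str : String) (out : Int) : Decidable (Spec_parse_education_level_py edu_str out) := by unfold Spec_parse_education_level_py; infer_instance

-- ===== CLAIM (what is proved, stated in full; the proofs are below) =====
def Claim_equal_parse_education_level_py : Prop := ∀ (edu_str : String), Dom_parse_education_level_py edu_str → Spec_parse_education_level_py edu_str (parse_education_level_py edu_str)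

-- ===== LEMMAS AND PROOFS =====

lemma edu_items_eq :
    PySem.Dict.items eduLevels =
      [("high_school", (0 : Int)), ("associate", 1), ("bachelor", 2), ("bachelors", 2),
       ("master", 3), ("masters", 3), ("mba", 3), ("phd", 4), ("doctorate", 4)] := by
  decide

set_option maxHeartbeats 4000000 in
lemma edu_core (L : String) :
    eduScan L [("phd", (4 : Int)), ("doctorate", 4), ("master", 3), ("masters", 3), ("mba", 3),
       ("bachelor", 2), ("bachelors", 2), ("associate", 1), ("high_school", 0)] =
    (match ([("high_school", (0 : Int)), ("associate", 1), ("bachelor", 2), ("bachelors", 2),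
       ("master", 3), ("masters", 3), ("mba", 3), ("phd", 4), ("doctorate", 4)]).filterMap
        (fun p => if PySem.Str.isIn p.1 L then some p.2 else none) with
      | [] => (0 : Int)
      | h :: t => t.foldl max h) := by
  cases h1 : PySem.Str.isIn "high_school" L <;>
  cases h2 : PySem.Str.isIn "associate" L <;>
  cases h3 : PySem.Str.isIn "bachelor" L <;>
  cases h4 : PySem.Str.isIn "bachelors" L <;>
  cases h5 : PySem.Str.isIn "master" L <;>
  cases h6 : PySem.Str.isIn "masters" L <;>
  cases h7 : PySem.Str.isIn "mba" L <;>
  cases h8 : PySem.Str.isIn "phd" L <;>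
  cases h9 : PySem.Str.isIn "doctorate" L <;>
  simp only [eduScan, List.filterMap, h1, h2, h3, h4, h5, h6, h7, h8, h9, reduceIte] <;> decide

-- ===== VERDICT (by name: the statement is the Claim_ definition above) =====
theorem parse_education_level_py_spec : Claim_equal_parse_education_level_py := by
  intro edu_str _
  unfold Spec_parse_education_level_py parse_education_level_py parse_education_level_py_alt
  by_cases h : edu_str = ""
  · simp [h]
  · simp only [h, if_false, edu_items_eq]
    exact edu_core (PySem.Str.lower edu_str)
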